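-- pv_equiv track=rewrite | github.com/BoudewijnKlijn/competitive_programming | leetcode/leetcode_1937.py | maximum_points_row
-- ===== SOURCE A (Python) =====
-- import heapq
-- from typing import List
--
-- def maximum_points_row(col_points: List[int]) -> List[int]:
--     """Helper function.
--     In some row, each column gives a certain number of points.
--     This function returns the maximum number of points per column.
--     Columns with few points, but close to a column with many points still give many points.
--     Each column away subtracts 1.
--     Examples:
--         [4, 0, 4] -> [4, 3, 4]
--         [1, 5, 1] -> [4, 5, 4]
--         [4, 0, 0] -> [4, 3, 2]"""
--     C = len(col_points)
--     best = [0] * C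
--     q = sorted((-value, c) for c, value in enumerate(col_points))
--     heapq.heapify(q)
--     visited = set()
--     while q:
--         neg_val, pos = heapq.heappop(q)
--         visited.add((neg_val, pos))
--         if neg_val < best[pos]:
--             best[pos] = neg_val
--             if pos > 0:
--                 if (neg_val + 1, pos - 1) not in visited:
--                     heapq.heappush(q, (neg_val + 1, pos - 1))
--                     visited.add((neg_val + 1, pos - 1))
--             if pos < C - 1:
--                 if (neg_val + 1, pos + 1) not in visited:
--                     heapq.heappush(q, (neg_val + 1, pos + 1))
--                     visited.add((neg_val + 1, pos + 1))
--     return [-val for val in best]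
-- ===== SOURCE B (Python) =====
-- def maximum_points_row(col_points):
--     """Two-pass running-max DP: left-to-right and right-to-left maxima decaying
--     by 1 per step, clamped below at 0 (columns contribute only positive points)."""
--     left = []
--     run = 0
--     for v in col_points:
--         run = max(run - 1, v)
--         left.append(run)
--     run = 0
--     right = []
--     for v in reversed(col_points):
--         run = max(run - 1, v)
--         right.append(run)
--     right.reverse()
--     return [max(l, r, 0) for l, r in zip(left, right)]
-- ===== Notes on version B (the rewrite author's own statement) =====
-- stated objective: faster
-- what changed: Replaces the heap-based Dijkstra-style propagation (priority queue plus visited set) by a two-pass running-maximum DP: a left-to-right and a right-to-left maximum decaying by 1 per column, clamped below at 0.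
import Mathlib
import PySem

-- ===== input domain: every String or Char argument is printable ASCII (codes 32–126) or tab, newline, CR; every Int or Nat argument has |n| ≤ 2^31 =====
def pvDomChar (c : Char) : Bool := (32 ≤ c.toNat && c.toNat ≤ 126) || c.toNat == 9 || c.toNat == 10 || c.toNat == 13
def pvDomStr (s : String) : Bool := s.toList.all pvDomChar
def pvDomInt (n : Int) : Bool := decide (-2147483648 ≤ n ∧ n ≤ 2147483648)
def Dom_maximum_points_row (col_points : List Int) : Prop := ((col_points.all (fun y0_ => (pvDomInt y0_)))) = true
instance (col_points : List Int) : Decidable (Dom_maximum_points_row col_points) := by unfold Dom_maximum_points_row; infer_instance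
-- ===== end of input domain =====

-- B replaces A's heap-based propagation by a two-pass running-maximum DP (asymptotically faster).

-- ===== PORT A =====
-- Python tuple comparison (lexicographic) on (Int, Int) pairs.
def pvLexLt (a b : Int × Int) : Bool := a.1 < b.1 || (a.1 == b.1 && a.2 < b.2)

-- least element of a nonempty collection, seed m: the element heapq.heappop returns
def pvFindMin (m : Int × Int) : List (Int × Int) → Int × Int
  | [] => m
  | x :: xs => pvFindMin (if pvLexLt x m then x else m) xs

-- a conditional one-element push onto the queue (and onto the visited set)
def pvPush (cond : Prop) [Decidable cond] (e : Int × Int) : List (Int × Int) :=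
  if cond then [e] else []

-- termination measure for the while-loop: a queue entry (v, pos) weighs 3^max(0,-v)
def pvWt (p : Int × Int) : Nat := 3 ^ (-p.1).toNat
def pvQwt (q : List (Int × Int)) : Nat := (q.map pvWt).sum

-- the lemmas below are cited by loopA's termination proof, so they must precede it
theorem pvFindMin_mem (m : Int × Int) (xs : List (Int × Int)) : pvFindMin m xs ∈ m :: xs := by
  induction xs generalizing m with
  | nil => simp [pvFindMin]
  | cons x xs ih =>
    rcases List.mem_cons.1 (ih (if pvLexLt x m then x else m)) with h1 | h1
    · rw [pvFindMin, h1]; split_ifs <;> simp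
    · simp [pvFindMin, h1]

theorem pvQwt_erase_of_mem {m : Int × Int} {q : List (Int × Int)} (h : m ∈ q) :
    pvQwt q = pvWt m + pvQwt (q.erase m) := by
  have hp := List.perm_cons_erase h
  have := (hp.map pvWt).sum_eq
  simpa [pvQwt] using this

theorem pvGetD_le_zero {best : List Int} (hb : ∀ x ∈ best, x ≤ 0) (n : ℕ) :
    best.getD n 0 ≤ 0 := by
  by_cases h : n < best.length
  · rw [List.getD_eq_getElem _ _ h]; exact hb _ (List.getElem_mem h)
  · rw [List.getD_eq_default _ _ (by omega)]

theorem pvPush_cases (cond : Prop) [Decidable cond] (e : Int × Int) :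
    pvPush cond e = [] ∨ pvPush cond e = [e] := by
  unfold pvPush; split_ifs <;> simp

theorem pvQwt_push_lt (q1 : List (Int × Int)) (w : Int) (hw : w ≤ -1) (a b : Int)
    (p1 p2 : List (Int × Int))
    (h1 : p1 = [] ∨ p1 = [(w + 1, a)]) (h2 : p2 = [] ∨ p2 = [(w + 1, b)]) :
    pvQwt (q1 ++ p1 ++ p2) < 3 ^ (-w).toNat + pvQwt q1 := by
  have hk : (-w).toNat = (-(w + 1)).toNat + 1 := by omega
  have hp : 0 < 3 ^ (-(w + 1)).toNat := by positivity
  have e1 : pvQwt p1 ≤ 3 ^ (-(w + 1)).toNat := by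
    rcases h1 with h | h <;> simp [h, pvQwt, pvWt]
  have e2 : pvQwt p2 ≤ 3 ^ (-(w + 1)).toNat := by
    rcases h2 with h | h <;> simp [h, pvQwt, pvWt]
  have e3 : pvQwt (q1 ++ p1 ++ p2) = pvQwt q1 + pvQwt p1 + pvQwt p2 := by
    simp [pvQwt, Nat.add_assoc]
  rw [e3, hk, pow_succ]
  omega

-- the while-loop of A; best[pos] is read/written with getD/set (pos is in range whenever
-- A dereferences it); the hypothesis hb (all best entries ≤ 0, an invariant of A's loop)
-- is carried only to justify termination
def loopA (cp : List Int) (best : List Int) (q : List (Int × Int))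
    (vis : PySem.Set (Int × Int)) (hb : ∀ x ∈ best, x ≤ 0) : List Int :=
  match q with
  | [] => best
  | x :: rest =>
    let m := pvFindMin x rest
    let q1 := (x :: rest).erase m
    let vis1 := PySem.Set.add vis m
    if hlt : m.1 < best.getD m.2.toNat 0 then
      let best1 := best.set m.2.toNat m.1
      let push1 := pvPush (m.2 > 0 ∧ (m.1 + 1, m.2 - 1) ∉ vis1) (m.1 + 1, m.2 - 1)
      let vis2 : PySem.Set (Int × Int) := vis1 ++ push1
      let push2 := pvPush (m.2 < (cp.length : Int) - 1 ∧ (m.1 + 1, m.2 + 1) ∉ vis2) (m.1 + 1, m.2 + 1)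
      loopA cp best1 (q1 ++ push1 ++ push2) (vis2 ++ push2)
        (by intro y hy
            rcases List.mem_or_eq_of_mem_set hy with h | h
            · exact hb y h
            · exact h ▸ le_trans (le_of_lt hlt) (pvGetD_le_zero hb _))
    else
      loopA cp best q1 vis1 hb
termination_by pvQwt q
decreasing_by
  · have hz := pvGetD_le_zero hb m.2.toNat
    have hw : m.1 ≤ -1 := by omega
    rw [pvQwt_erase_of_mem (show m ∈ x :: rest from pvFindMin_mem x rest)]
    exact pvQwt_push_lt q1 m.1 hw (m.2 - 1) (m.2 + 1) push1 push2
      (pvPush_cases _ _) (pvPush_cases _ _)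
  · show pvQwt ((x :: rest).erase (pvFindMin x rest)) < pvQwt (x :: rest)
    rw [pvQwt_erase_of_mem (pvFindMin_mem x rest)]
    have : 0 < pvWt (pvFindMin x rest) := by unfold pvWt; positivity
    omega

def maximum_points_row (col_points : List Int) : List Int :=
  let best := List.replicate col_points.length (0 : Int)
  -- q = sorted((-value, c) for c, value in enumerate(col_points)); heapq.heapify is the
  -- identity on the queue's contents, heappop is ported as "remove the least pair"
  -- (pvFindMin + erase) and heappush as append — exactly heapq's contract
  let q := PySem.List.sorted2 ((PySem.List.enumerate col_points).map (fun p => (-p.2, p.1)))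
            (fun t => t.1) (fun t => t.2) false
  (loopA col_points best q ([] : PySem.Set (Int × Int))
      (by intro y hy; rw [List.eq_of_mem_replicate hy])).map (fun v => -v)

-- ===== PORT B =====
-- one pass of B: running maximum decaying by one per step
def pvPass (run : Int) : List Int → List Int
  | [] => []
  | v :: vs => (max (run - 1) v) :: pvPass (max (run - 1) v) vs

def maximum_points_row_alt (col_points : List Int) : List Int :=
  let left := pvPass 0 col_points
  let right := (pvPass 0 col_points.reverse).reverse
  List.zipWith (fun l r => max (max l r) 0) left right

-- ===== PRECONDITION & SPEC =====
def Spec_maximum_points_row (col_points : List Int) (out : List Int) : Prop := out = maximum_points_row_alt col_points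
instance (col_points : List Int) (out : List Int) : Decidable (Spec_maximum_points_row col_points out) := by unfold Spec_maximum_points_row; infer_instance

-- ===== CLAIM (what is proved, stated in full; the proofs are below) =====
def Claim_equal_maximum_points_row : Prop := ∀ (col_points : List Int), Dom_maximum_points_row col_points → Spec_maximum_points_row col_points (maximum_points_row col_points)

-- ===== LEMMAS AND PROOFS =====

-- pvF cp i = max over columns j of cp[j] - |i - j| (the seed cp.getD i.toNat 0 is the
-- j = i candidate whenever 0 ≤ i < len cp, so it is redundant there)
def pvF (cp : List Int) (i : ℤ) : ℤ :=
  ((List.range cp.length).map (fun j => cp.getD j 0 - ((i - (j : ℤ)).natAbs : ℤ))).foldl max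
    (cp.getD i.toNat 0)

theorem pvF_ge (cp : List Int) (i : ℤ) (j : ℕ) (hj : j < cp.length) :
    cp.getD j 0 - ((i - (j : ℤ)).natAbs : ℤ) ≤ pvF cp i := by
  unfold pvF
  rw [List.foldl_map]
  exact (PySem.List.le_foldl_max_int (List.range cp.length) _ _).2 j (List.mem_range.2 hj)

theorem pvF_attained (cp : List Int) (i : ℤ) (h0 : 0 ≤ i) (hi : i.toNat < cp.length) :
    ∃ j : ℕ, j < cp.length ∧ pvF cp i = cp.getD j 0 - ((i - (j : ℤ)).natAbs : ℤ) := by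
  rcases PySem.List.foldl_max_mem
      ((List.range cp.length).map (fun j => cp.getD j 0 - ((i - (j : ℤ)).natAbs : ℤ)))
      (cp.getD i.toNat 0) with h | h
  · refine ⟨i.toNat, hi, ?_⟩
    have : ((i - (i.toNat : ℤ)).natAbs : ℤ) = 0 := by omega
    rw [pvF, h, this, sub_zero]
  · rcases List.mem_map.1 h with ⟨j, hj, hje⟩
    exact ⟨j, List.mem_range.1 hj, by rw [pvF, hje]⟩

theorem pvF_lipschitz (cp : List Int) (i i' : ℤ) (h0 : 0 ≤ i) (hi : i.toNat < cp.length) :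
    pvF cp i - ((i' - i).natAbs : ℤ) ≤ pvF cp i' := by
  rcases pvF_attained cp i h0 hi with ⟨j, hj, he⟩
  have h1 := pvF_ge cp i' j hj
  omega

-- the loop invariant of A's while-loop
structure InvA (cp best : List Int) (q vis : List (Int × Int)) : Prop where
  len : best.length = cp.length
  nonpos : ∀ x ∈ best, x ≤ 0
  qok : ∀ u p : ℤ, (u, p) ∈ q → 0 ≤ p ∧ p < (cp.length : ℤ) ∧ -(pvF cp p) ≤ u
  sound : ∀ k : ℕ, k < cp.length → min 0 (-(pvF cp (k : ℤ))) ≤ best.getD k 0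
  lip : ∀ p p' : ℕ, p < cp.length → p' < cp.length → (p' = p + 1 ∨ p = p' + 1) →
        best.getD p' 0 ≤ best.getD p 0 + 1 ∨ (best.getD p 0 + 1, (p' : ℤ)) ∈ q
  visok : ∀ u p : ℤ, (u, p) ∈ vis → (u, p) ∈ q ∨ best.getD p.toNat 0 ≤ u
  src : ∀ k : ℕ, k < cp.length → best.getD k 0 ≤ -(cp.getD k 0) ∨ (-(cp.getD k 0), (k : ℤ)) ∈ q

theorem pvGetD_set_self {l : List Int} {n : ℕ} (w : Int) (h : n < l.length) :
    (l.set n w).getD n 0 = w := by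
  rw [List.getD_eq_getElem _ _ (by simpa using h)]; simp

theorem pvGetD_set_ne {l : List Int} {n k : ℕ} (w : Int) (h : k ≠ n) :
    (l.set n w).getD k 0 = l.getD k 0 := by
  simp [List.getD, List.getElem?_set_ne (by omega : n ≠ k)]

theorem pvGetD_reverse {l : List Int} {k : ℕ} (h : k < l.length) :
    l.reverse.getD k 0 = l.getD (l.length - 1 - k) 0 := by
  rw [List.getD_eq_getElem _ _ (by simpa using h), List.getD_eq_getElem _ _ (by omega),
    List.getElem_reverse]

theorem InvA_final {cp best : List Int} {vis : List (Int × Int)} (h : InvA cp best [] vis) :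
    ∀ k : ℕ, k < cp.length → best.getD k 0 = min 0 (-(pvF cp (k : ℤ))) := by
  have chain : ∀ n j k : ℕ, j < cp.length → k < cp.length → (k = j + n ∨ j = k + n) →
      best.getD k 0 ≤ best.getD j 0 + (n : ℤ) := by
    intro n
    induction n with
    | zero =>
      intro j k _ _ hd
      have : j = k := by omega
      subst this; simp
    | succ n ih =>
      intro j k hj hk hd
      rcases hd with hd | hd
      · rcases h.lip j (j + 1) hj (by omega) (Or.inl rfl) with ha | ha
        · have hc := ih (j + 1) k (by omega) hk (Or.inl (by omega))
          push_cast
          push_cast at hc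
          omega
        · simp at ha
      · rcases h.lip (k + 1) k (by omega) hk (Or.inr rfl) with ha | ha
        · have hc := ih j (k + 1) hj (by omega) (Or.inr (by omega))
          push_cast
          push_cast at hc
          omega
        · simp at ha
  intro k hk
  have hsrc : ∀ j : ℕ, j < cp.length → best.getD j 0 ≤ -(cp.getD j 0) := by
    intro j hj
    rcases h.src j hj with hs | hs
    · exact hs
    · simp at hs
  rcases pvF_attained cp (k : ℤ) (by omega) (by simpa using hk) with ⟨j, hj, he⟩
  have hz := pvGetD_le_zero h.nonpos k
  have hso := h.sound k hk
  have hsj := hsrc j hj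
  by_cases hjk : j ≤ k
  · have hc := chain (k - j) j k hj hk (Or.inl (by omega))
    omega
  · have hc := chain (j - k) j k hj hk (Or.inr (by omega))
    omega

theorem InvA_step_update {cp best : List Int} {q vis : List (Int × Int)}
    (inv : InvA cp best q vis) {m : Int × Int}
    (hm : m ∈ q) (hlt : m.1 < best.getD m.2.toNat 0)
    {push1 push2 : List (Int × Int)}
    (h1 : push1 = pvPush (m.2 > 0 ∧ (m.1 + 1, m.2 - 1) ∉ PySem.Set.add vis m) (m.1 + 1, m.2 - 1))
    (h2 : push2 = pvPush (m.2 < (cp.length : Int) - 1 ∧ (m.1 + 1, m.2 + 1) ∉ (PySem.Set.add vis m ++ push1)) (m.1 + 1, m.2 + 1)) :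
    InvA cp (best.set m.2.toNat m.1) (q.erase m ++ push1 ++ push2)
      (PySem.Set.add vis m ++ push1 ++ push2) := by
  obtain ⟨hp0, hpC, hpF⟩ := inv.qok m.1 m.2 (by rwa [Prod.mk.eta])
  have hlen := inv.len
  have hPlt : m.2.toNat < cp.length := by omega
  have hPbest : m.2.toNat < best.length := by omega
  have hb0 : best.getD m.2.toNat 0 ≤ 0 := pvGetD_le_zero inv.nonpos m.2.toNat
  have hw1 : m.1 ≤ -1 := by omega
  have hPI : ((m.2.toNat : ℕ) : ℤ) = m.2 := by omega
  have hle : ∀ k : ℕ, (best.set m.2.toNat m.1).getD k 0 ≤ best.getD k 0 := by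
    intro k
    by_cases hk : k = m.2.toNat
    · subst hk; rw [pvGetD_set_self _ hPbest]; omega
    · rw [pvGetD_set_ne _ hk]
  have hset_self : (best.set m.2.toNat m.1).getD m.2.toNat 0 = m.1 := pvGetD_set_self _ hPbest
  have hpush1 : ∀ y ∈ push1, y = (m.1 + 1, m.2 - 1) ∧ 0 < m.2 := by
    intro y hy; rw [h1] at hy; unfold pvPush at hy; split_ifs at hy with hc
    · rcases hc with ⟨hc1, _⟩; simp at hy; rw [hy]; exact ⟨rfl, hc1⟩
    · simp at hy
  have hpush2 : ∀ y ∈ push2, y = (m.1 + 1, m.2 + 1) ∧ m.2 < (cp.length : ℤ) - 1 := by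
    intro y hy; rw [h2] at hy; unfold pvPush at hy; split_ifs at hy with hc
    · rcases hc with ⟨hc1, _⟩; simp at hy; rw [hy]; exact ⟨rfl, hc1⟩
    · simp at hy
  have hK1 : 0 < m.2 → (m.1 + 1, m.2 - 1) ∈ q.erase m ++ push1 ++ push2 ∨ (m.1 + 1, m.2 - 1) ∈ vis := by
    intro hgt
    by_cases hc : (m.1 + 1, m.2 - 1) ∈ PySem.Set.add vis m
    · right
      rcases (PySem.Set.mem_add vis m _).1 hc with h | h
      · exact h
      · exfalso; have := congrArg Prod.fst h; simp only [] at this; omega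
    · left
      have hp1 : push1 = [(m.1 + 1, m.2 - 1)] := by rw [h1]; unfold pvPush; rw [if_pos ⟨hgt, hc⟩]
      exact List.mem_append.2 (Or.inl (List.mem_append.2 (Or.inr (by simp [hp1]))))
  have hK2 : m.2 < (cp.length : ℤ) - 1 →
      (m.1 + 1, m.2 + 1) ∈ q.erase m ++ push1 ++ push2 ∨ (m.1 + 1, m.2 + 1) ∈ vis := by
    intro hltC
    by_cases hc : (m.1 + 1, m.2 + 1) ∈ PySem.Set.add vis m ++ push1
    · right
      rcases List.mem_append.1 hc with h | h
      · rcases (PySem.Set.mem_add vis m _).1 h with h' | h'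
        · exact h'
        · exfalso; have := congrArg Prod.fst h'; simp only [] at this; omega
      · exfalso; rcases hpush1 _ h with ⟨he, _⟩
        have := congrArg Prod.snd he; simp only [] at this; omega
    · left
      have hp2 : push2 = [(m.1 + 1, m.2 + 1)] := by rw [h2]; unfold pvPush; rw [if_pos ⟨hltC, hc⟩]
      exact List.mem_append.2 (Or.inr (by simp [hp2]))
  have hqsub : ∀ y : Int × Int, y ∈ q.erase m → y ∈ q.erase m ++ push1 ++ push2 := by
    intro y hy
    exact List.mem_append.2 (Or.inl (List.mem_append.2 (Or.inl hy)))
  refine ⟨by simpa using hlen, ?_, ?_, ?_, ?_, ?_, ?_⟩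
  · intro x hx
    rcases List.mem_or_eq_of_mem_set hx with h | h
    · exact inv.nonpos x h
    · subst h; omega
  · intro u p hq
    rcases List.mem_append.1 hq with hq' | hq'
    · rcases List.mem_append.1 hq' with hq'' | hq''
      · exact inv.qok u p (List.mem_of_mem_erase hq'')
      · rcases hpush1 _ hq'' with ⟨he, hgt⟩
        have e1 : u = m.1 + 1 := congrArg Prod.fst he
        have e2 : p = m.2 - 1 := congrArg Prod.snd he
        subst e1; subst e2
        have hlip := pvF_lipschitz cp m.2 (m.2 - 1) hp0 hPlt
        refine ⟨by omega, by omega, by omega⟩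
    · rcases hpush2 _ hq' with ⟨he, hltC⟩
      have e1 : u = m.1 + 1 := congrArg Prod.fst he
      have e2 : p = m.2 + 1 := congrArg Prod.snd he
      subst e1; subst e2
      have hlip := pvF_lipschitz cp m.2 (m.2 + 1) hp0 hPlt
      refine ⟨by omega, by omega, by omega⟩
  · intro k hk
    by_cases hkP : k = m.2.toNat
    · subst hkP; rw [hset_self, hPI]; omega
    · rw [pvGetD_set_ne _ hkP]; exact inv.sound k hk
  · intro p p' hp hp' hadj
    by_cases hpP : p = m.2.toNat
    · subst hpP
      rw [hset_self]
      rcases hadj with hadj | hadj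
      · have hC : m.2 < (cp.length : ℤ) - 1 := by omega
        have hcast : ((p' : ℕ) : ℤ) = m.2 + 1 := by omega
        rcases hK2 hC with h | h
        · right; rw [hcast]; exact h
        · rcases inv.visok (m.1 + 1) (m.2 + 1) h with hq | hbv
          · by_cases hxm : ((m.1 + 1 : ℤ), (m.2 + 1 : ℤ)) = m
            · exfalso; have := congrArg Prod.fst hxm; simp only [] at this; omega
            · right; rw [hcast]; exact hqsub _ ((List.mem_erase_of_ne hxm).2 hq)
          · left
            have hne : p' ≠ m.2.toNat := by omega
            rw [pvGetD_set_ne _ hne]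
            have he' : (m.2 + 1).toNat = p' := by omega
            rw [he'] at hbv
            omega
      · have hgt : 0 < m.2 := by omega
        have hcast : ((p' : ℕ) : ℤ) = m.2 - 1 := by omega
        rcases hK1 hgt with h | h
        · right; rw [hcast]; exact h
        · rcases inv.visok (m.1 + 1) (m.2 - 1) h with hq | hbv
          · by_cases hxm : ((m.1 + 1 : ℤ), (m.2 - 1 : ℤ)) = m
            · exfalso; have := congrArg Prod.fst hxm; simp only [] at this; omega
            · right; rw [hcast]; exact hqsub _ ((List.mem_erase_of_ne hxm).2 hq)
          · left
            have hne : p' ≠ m.2.toNat := by omega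
            rw [pvGetD_set_ne _ hne]
            have he' : (m.2 - 1).toNat = p' := by omega
            rw [he'] at hbv
            omega
    · by_cases hp'P : p' = m.2.toNat
      · subst hp'P
        rw [hset_self, pvGetD_set_ne _ hpP]
        rcases inv.lip p m.2.toNat hp hp' hadj with h | h
        · left; omega
        · by_cases hxm : (best.getD p 0 + 1, ((m.2.toNat : ℕ) : ℤ)) = m
          · left; have e1 := congrArg Prod.fst hxm; simp only [] at e1; omega
          · right; exact hqsub _ ((List.mem_erase_of_ne hxm).2 h)
      · rw [pvGetD_set_ne _ hp'P, pvGetD_set_ne _ hpP]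
        rcases inv.lip p p' hp hp' hadj with h | h
        · exact Or.inl h
        · by_cases hxm : (best.getD p 0 + 1, ((p' : ℕ) : ℤ)) = m
          · exfalso
            have e2 := congrArg Prod.snd hxm; simp only [] at e2; omega
          · exact Or.inr (hqsub _ ((List.mem_erase_of_ne hxm).2 h))
  · intro u p hv
    rcases List.mem_append.1 hv with hv' | hv'
    · rcases List.mem_append.1 hv' with hv'' | hv''
      · rcases (PySem.Set.mem_add vis m _).1 hv'' with h | h
        · rcases inv.visok u p h with hq | hbv
          · by_cases hxm : (u, p) = m
            · right
              have e1 : u = m.1 := congrArg Prod.fst hxm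
              have e2 : p = m.2 := congrArg Prod.snd hxm
              rw [e1, e2, hset_self]
            · left; exact hqsub _ ((List.mem_erase_of_ne hxm).2 hq)
          · right; exact le_trans (hle p.toNat) hbv
        · right
          have e1 : u = m.1 := congrArg Prod.fst h
          have e2 : p = m.2 := congrArg Prod.snd h
          rw [e1, e2, hset_self]
      · exact Or.inl (List.mem_append.2 (Or.inl (List.mem_append.2 (Or.inr hv''))))
    · exact Or.inl (List.mem_append.2 (Or.inr hv'))
  · intro k hk
    rcases inv.src k hk with h | h
    · exact Or.inl (le_trans (hle k) h)
    · by_cases hxm : (-(cp.getD k 0), (k : ℤ)) = m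
      · left
        have e1 : -(cp.getD k 0) = m.1 := congrArg Prod.fst hxm
        have e2 : ((k : ℕ) : ℤ) = m.2 := congrArg Prod.snd hxm
        have hkP : k = m.2.toNat := by omega
        rw [hkP] at e1 ⊢
        rw [hset_self]
        omega
      · exact Or.inr (hqsub _ ((List.mem_erase_of_ne hxm).2 h))

theorem InvA_step_skip {cp best : List Int} {q vis : List (Int × Int)}
    (inv : InvA cp best q vis) {m : Int × Int}
    (_hm : m ∈ q) (hge : ¬ m.1 < best.getD m.2.toNat 0) :
    InvA cp best (q.erase m) (PySem.Set.add vis m) := by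
  have hbp : best.getD m.2.toNat 0 ≤ m.1 := by omega
  refine ⟨inv.len, inv.nonpos, ?_, inv.sound, ?_, ?_, ?_⟩
  · intro u p hq
    exact inv.qok u p (List.mem_of_mem_erase hq)
  · intro p p' hp hp' hadj
    rcases inv.lip p p' hp hp' hadj with ha | ha
    · exact Or.inl ha
    · by_cases hx : (best.getD p 0 + 1, (p' : ℤ)) = m
      · left
        have e1 : m.1 = best.getD p 0 + 1 := by rw [← hx]
        have e2 : m.2 = (p' : ℤ) := by rw [← hx]
        rw [e1, e2] at hbp
        simpa using hbp
      · exact Or.inr ((List.mem_erase_of_ne hx).2 ha)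
  · intro u p hv
    rcases (PySem.Set.mem_add vis m (u, p)).1 hv with hv' | hv'
    · rcases inv.visok u p hv' with hq | hb'
      · by_cases hx : (u, p) = m
        · right
          have e1 : m.1 = u := by rw [← hx]
          have e2 : m.2 = p := by rw [← hx]
          rw [e1, e2] at hbp
          exact hbp
        · exact Or.inl ((List.mem_erase_of_ne hx).2 hq)
      · exact Or.inr hb'
    · right
      have e1 : m.1 = u := by rw [← hv']
      have e2 : m.2 = p := by rw [← hv']
      rw [e1, e2] at hbp
      exact hbp
  · intro k hk
    rcases inv.src k hk with hs | hs
    · exact Or.inl hs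
    · by_cases hx : (-(cp.getD k 0), (k : ℤ)) = m
      · left
        have e1 : m.1 = -(cp.getD k 0) := by rw [← hx]
        have e2 : m.2 = (k : ℤ) := by rw [← hx]
        rw [e1, e2] at hbp
        simpa using hbp
      · exact Or.inr ((List.mem_erase_of_ne hx).2 hs)

theorem loopA_spec (cp : List Int) (N : ℕ) : ∀ (q : List (Int × Int)) (best : List Int)
    (vis : List (Int × Int)) (hb : ∀ x ∈ best, x ≤ 0), pvQwt q ≤ N → InvA cp best q vis →
    (loopA cp best q vis hb).length = cp.length ∧
      ∀ k : ℕ, k < cp.length → (loopA cp best q vis hb).getD k 0 = min 0 (-(pvF cp (k : ℤ))) := by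
  induction N with
  | zero =>
    intro q best vis hb hN hInv
    cases q with
    | nil =>
      rw [loopA]
      exact ⟨hInv.len, InvA_final hInv⟩
    | cons x rest =>
      exfalso
      have h1 : 0 < pvWt x := by unfold pvWt; positivity
      have h2 : pvQwt (x :: rest) = pvWt x + pvQwt rest := by simp [pvQwt]
      omega
  | succ N ih =>
    intro q best vis hb hN hInv
    cases q with
    | nil =>
      rw [loopA]
      exact ⟨hInv.len, InvA_final hInv⟩
    | cons x rest =>
      have hm : pvFindMin x rest ∈ x :: rest := pvFindMin_mem x rest
      have herase := pvQwt_erase_of_mem hm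
      rw [loopA]
      by_cases hlt : (pvFindMin x rest).1 < best.getD (pvFindMin x rest).2.toNat 0
      · rw [dif_pos hlt]
        apply ih
        · have hz := pvGetD_le_zero hb (pvFindMin x rest).2.toNat
          have hw : (pvFindMin x rest).1 ≤ -1 := by omega
          have hd := pvQwt_push_lt ((x :: rest).erase (pvFindMin x rest)) (pvFindMin x rest).1 hw
            ((pvFindMin x rest).2 - 1) ((pvFindMin x rest).2 + 1)
            (pvPush ((pvFindMin x rest).2 > 0 ∧
                ((pvFindMin x rest).1 + 1, (pvFindMin x rest).2 - 1) ∉ PySem.Set.add vis (pvFindMin x rest))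
              ((pvFindMin x rest).1 + 1, (pvFindMin x rest).2 - 1))
            (pvPush ((pvFindMin x rest).2 < (cp.length : Int) - 1 ∧
                ((pvFindMin x rest).1 + 1, (pvFindMin x rest).2 + 1) ∉
                  (PySem.Set.add vis (pvFindMin x rest) ++
                    pvPush ((pvFindMin x rest).2 > 0 ∧
                        ((pvFindMin x rest).1 + 1, (pvFindMin x rest).2 - 1) ∉ PySem.Set.add vis (pvFindMin x rest))
                      ((pvFindMin x rest).1 + 1, (pvFindMin x rest).2 - 1)))
              ((pvFindMin x rest).1 + 1, (pvFindMin x rest).2 + 1))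
            (pvPush_cases _ _) (pvPush_cases _ _)
          have hwt : pvWt (pvFindMin x rest) = 3 ^ (-(pvFindMin x rest).1).toNat := rfl
          omega
        · exact InvA_step_update hInv hm hlt rfl rfl
      · rw [dif_neg hlt]
        apply ih
        · have h1 : 0 < pvWt (pvFindMin x rest) := by unfold pvWt; positivity
          omega
        · exact InvA_step_skip hInv hm hlt

theorem InvA_init (cp : List Int) :
    InvA cp (List.replicate cp.length 0)
      (PySem.List.sorted2 ((PySem.List.enumerate cp).map (fun p => (-p.2, p.1)))
        (fun t => t.1) (fun t => t.2) false) [] := by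
  have hmem : ∀ y : Int × Int,
      y ∈ PySem.List.sorted2 ((PySem.List.enumerate cp).map (fun p => (-p.2, p.1)))
          (fun t => t.1) (fun t => t.2) false ↔
        ∃ k : ℕ, k < cp.length ∧ y = (-(cp.getD k 0), (k : ℤ)) := by
    intro y
    rw [(PySem.List.sorted2_perm _ _ _ _).mem_iff, List.mem_map]
    constructor
    · rintro ⟨e, he, heq⟩
      rcases (PySem.List.mem_enumerate_iff _ _ _).1 he with ⟨k, hk, hek⟩
      refine ⟨k, hk, ?_⟩
      rw [← heq, hek]
      simp [List.getD, List.getElem?_eq_getElem hk]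
    · rintro ⟨k, hk, hy⟩
      refine ⟨((k : ℤ), cp[k]), (PySem.List.mem_enumerate_iff _ _ _).2 ⟨k, hk, by simp⟩, ?_⟩
      rw [hy]
      simp [List.getD, List.getElem?_eq_getElem hk]
  have hrep : ∀ k : ℕ, (List.replicate cp.length (0 : Int)).getD k 0 = 0 := by
    intro k
    by_cases hk : k < cp.length
    · rw [List.getD_eq_getElem _ _ (by simpa using hk)]; simp
    · rw [List.getD_eq_default _ _ (by simpa using hk)]
  refine ⟨by simp, ?_, ?_, ?_, ?_, ?_, ?_⟩
  · intro x hx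
    rw [List.eq_of_mem_replicate hx]
  · intro u p h
    rcases (hmem _).1 h with ⟨k, hk, he⟩
    have e1 : u = -(cp.getD k 0) := congrArg Prod.fst he
    have e2 : p = (k : ℤ) := congrArg Prod.snd he
    subst e1; subst e2
    have hg := pvF_ge cp (k : ℤ) k hk
    refine ⟨by omega, by omega, by omega⟩
  · intro k hk
    rw [hrep k]
    omega
  · intro p p' hp hp' _
    left
    rw [hrep p, hrep p']
    omega
  · intro u p h
    simp at h
  · intro k hk
    exact Or.inr ((hmem _).2 ⟨k, hk, rfl⟩)

theorem maximum_points_row_char (cp : List Int) :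
    (maximum_points_row cp).length = cp.length ∧
      ∀ k : ℕ, k < cp.length → (maximum_points_row cp)[k]? = some (max 0 (pvF cp (k : ℤ))) := by
  obtain ⟨hlen, hval⟩ :=
    loopA_spec cp
      (pvQwt (PySem.List.sorted2 ((PySem.List.enumerate cp).map (fun p => (-p.2, p.1)))
        (fun t => t.1) (fun t => t.2) false))
      (PySem.List.sorted2 ((PySem.List.enumerate cp).map (fun p => (-p.2, p.1)))
        (fun t => t.1) (fun t => t.2) false)
      (List.replicate cp.length 0) []
      (by intro y hy; rw [List.eq_of_mem_replicate hy]) le_rfl (InvA_init cp)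
  have he : maximum_points_row cp =
      (loopA cp (List.replicate cp.length 0)
        (PySem.List.sorted2 ((PySem.List.enumerate cp).map (fun p => (-p.2, p.1)))
          (fun t => t.1) (fun t => t.2) false) []
        (by intro y hy; rw [List.eq_of_mem_replicate hy])).map (fun v => -v) := rfl
  rw [he]
  refine ⟨by rw [List.length_map, hlen], ?_⟩
  intro k hk
  rw [List.getElem?_map, List.getElem?_eq_getElem (show k < _ by rw [hlen]; exact hk)]
  have hg : (loopA cp (List.replicate cp.length 0)
        (PySem.List.sorted2 ((PySem.List.enumerate cp).map (fun p => (-p.2, p.1)))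
          (fun t => t.1) (fun t => t.2) false) []
        (by intro y hy; rw [List.eq_of_mem_replicate hy]))[k]'(by omega) =
      min 0 (-(pvF cp (k : ℤ))) := by
    rw [← List.getD_eq_getElem _ 0, hval k hk]
  rw [hg]
  simp only [Option.map_some]
  congr 1
  omega

theorem length_pvPass (run : ℤ) (cp : List Int) : (pvPass run cp).length = cp.length := by
  induction cp generalizing run with
  | nil => rfl
  | cons v vs ih => simp [pvPass, ih]

theorem pvPass_getElem? (cp : List Int) : ∀ (run : ℤ) (k : ℕ), k < cp.length →
    (pvPass run cp)[k]? =
      some (((List.range (k + 1)).map (fun j => cp.getD j 0 - ((k : ℤ) - (j : ℤ)))).foldl max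
        (run - ((k : ℤ) + 1))) := by
  induction cp with
  | nil => intro run k hk; simp at hk
  | cons v vs ih =>
    intro run k hk
    cases k with
    | zero => simp [pvPass, List.range_one]
    | succ k =>
      have hk' : k < vs.length := by simpa using hk
      simp only [pvPass, List.getElem?_cons_succ]
      rw [ih (max (run - 1) v) k hk']
      have hR : (List.range (k + 1 + 1)).map
            (fun j : ℕ => (v :: vs).getD j 0 - (((k + 1 : ℕ) : ℤ) - (j : ℤ))) =
          (v - ((k : ℤ) + 1)) ::
            (List.range (k + 1)).map (fun j : ℕ => vs.getD j 0 - ((k : ℤ) - (j : ℤ))) := by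
        rw [List.range_succ_eq_map, List.map_cons, List.map_map]
        refine List.cons_eq_cons.mpr ⟨?_, ?_⟩
        · simp only [List.getD_cons_zero]
          push_cast; ring
        · apply List.map_congr_left
          intro j hj
          simp only [Function.comp_apply, Nat.succ_eq_add_one, List.getD_cons_succ]
          push_cast; ring
      rw [hR, List.foldl_cons]
      have hseed : max (run - 1) v - ((k : ℤ) + 1) =
          max (run - (((k + 1 : ℕ) : ℤ) + 1)) (v - ((k : ℤ) + 1)) := by
        push_cast; omega
      rw [hseed]

theorem maximum_points_row_alt_char (cp : List Int) :
    (maximum_points_row_alt cp).length = cp.length ∧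
      ∀ k : ℕ, k < cp.length → (maximum_points_row_alt cp)[k]? = some (max 0 (pvF cp (k : ℤ))) := by
  have hlen : (maximum_points_row_alt cp).length = cp.length := by
    simp [maximum_points_row_alt, length_pvPass]
  refine ⟨hlen, ?_⟩
  intro k hk
  have hrl : (pvPass 0 cp.reverse).length = cp.length := by
    rw [length_pvPass]; simp
  show (List.zipWith (fun l r => max (max l r) 0) (pvPass 0 cp)
      ((pvPass 0 cp.reverse).reverse))[k]? = some (max 0 (pvF cp (k : ℤ)))
  rw [List.getElem?_zipWith, pvPass_getElem? cp 0 k hk,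
    List.getElem?_reverse (by omega),
    hrl, pvPass_getElem? cp.reverse 0 (cp.length - 1 - k) (by simp; omega)]
  simp only []
  congr 1
  -- pure arithmetic: max(L, R, 0) = max(0, pvF cp k)
  have h0k : ((cp.length - 1 - k : ℕ) : ℤ) = (cp.length : ℤ) - 1 - k := by omega
  apply le_antisymm
  · refine max_le (max_le ?_ ?_) (le_max_left 0 _)
    · rcases PySem.List.foldl_max_mem
          ((List.range (k + 1)).map (fun j : ℕ => cp.getD j 0 - ((k : ℤ) - (j : ℤ))))
          (0 - ((k : ℤ) + 1)) with h | h
      · have := le_max_left (0 : ℤ) (pvF cp (k : ℤ))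
        omega
      · rcases List.mem_map.1 h with ⟨j, hj, hje⟩
        have hjk := List.mem_range.1 hj
        have hg := pvF_ge cp (k : ℤ) j (by omega)
        have := le_max_right (0 : ℤ) (pvF cp (k : ℤ))
        omega
    · rcases PySem.List.foldl_max_mem
          ((List.range (cp.length - 1 - k + 1)).map
            (fun j : ℕ => cp.reverse.getD j 0 - (((cp.length - 1 - k : ℕ) : ℤ) - (j : ℤ))))
          (0 - (((cp.length - 1 - k : ℕ) : ℤ) + 1)) with h | h
      · have := le_max_left (0 : ℤ) (pvF cp (k : ℤ))
        omega
      · rcases List.mem_map.1 h with ⟨j, hj, hje⟩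
        have hjk := List.mem_range.1 hj
        rw [pvGetD_reverse (by omega : j < cp.length)] at hje
        have hg := pvF_ge cp (k : ℤ) (cp.length - 1 - j) (by omega)
        have := le_max_right (0 : ℤ) (pvF cp (k : ℤ))
        omega
  · refine max_le ?_ ?_
    · have h1 := le_max_left
        (max (((List.range (k + 1)).map (fun j : ℕ => cp.getD j 0 - ((k : ℤ) - (j : ℤ)))).foldl max
          (0 - ((k : ℤ) + 1)))
          (((List.range (cp.length - 1 - k + 1)).map
            (fun j : ℕ => cp.reverse.getD j 0 - (((cp.length - 1 - k : ℕ) : ℤ) - (j : ℤ)))).foldl max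
          (0 - (((cp.length - 1 - k : ℕ) : ℤ) + 1)))) (0 : ℤ)
      omega
    · rcases pvF_attained cp (k : ℤ) (by omega) (by simpa using hk) with ⟨j, hj, he⟩
      by_cases hjk : j ≤ k
      · have hmm : (cp.getD j 0 - ((k : ℤ) - (j : ℤ))) ∈
            (List.range (k + 1)).map (fun j : ℕ => cp.getD j 0 - ((k : ℤ) - (j : ℤ))) :=
          List.mem_map.2 ⟨j, List.mem_range.2 (by omega), rfl⟩
        have hle := (PySem.List.le_foldl_max
            ((List.range (k + 1)).map (fun j : ℕ => cp.getD j 0 - ((k : ℤ) - (j : ℤ))))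
            (0 - ((k : ℤ) + 1))).2 _ hmm
        have h2 := le_max_left
          (((List.range (k + 1)).map (fun j : ℕ => cp.getD j 0 - ((k : ℤ) - (j : ℤ)))).foldl max
            (0 - ((k : ℤ) + 1)))
          (((List.range (cp.length - 1 - k + 1)).map
            (fun j : ℕ => cp.reverse.getD j 0 - (((cp.length - 1 - k : ℕ) : ℤ) - (j : ℤ)))).foldl max
          (0 - (((cp.length - 1 - k : ℕ) : ℤ) + 1)))
        have h3 := le_max_left
          (max (((List.range (k + 1)).map (fun j : ℕ => cp.getD j 0 - ((k : ℤ) - (j : ℤ)))).foldl max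
            (0 - ((k : ℤ) + 1)))
            (((List.range (cp.length - 1 - k + 1)).map
              (fun j : ℕ => cp.reverse.getD j 0 - (((cp.length - 1 - k : ℕ) : ℤ) - (j : ℤ)))).foldl max
            (0 - (((cp.length - 1 - k : ℕ) : ℤ) + 1)))) (0 : ℤ)
        omega
      · have hje : cp.reverse.getD (cp.length - 1 - j) 0 -
              (((cp.length - 1 - k : ℕ) : ℤ) - ((cp.length - 1 - j : ℕ) : ℤ)) =
            cp.getD j 0 - (((cp.length - 1 - k : ℕ) : ℤ) - ((cp.length - 1 - j : ℕ) : ℤ)) := by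
          rw [pvGetD_reverse (by omega : cp.length - 1 - j < cp.length)]
          congr 2
          omega
        have hmm : (cp.reverse.getD (cp.length - 1 - j) 0 -
              (((cp.length - 1 - k : ℕ) : ℤ) - ((cp.length - 1 - j : ℕ) : ℤ))) ∈
            (List.range (cp.length - 1 - k + 1)).map
              (fun j : ℕ => cp.reverse.getD j 0 - (((cp.length - 1 - k : ℕ) : ℤ) - (j : ℤ))) :=
          List.mem_map.2 ⟨cp.length - 1 - j, List.mem_range.2 (by omega), rfl⟩
        have hle := (PySem.List.le_foldl_max
            ((List.range (cp.length - 1 - k + 1)).map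
              (fun j : ℕ => cp.reverse.getD j 0 - (((cp.length - 1 - k : ℕ) : ℤ) - (j : ℤ))))
            (0 - (((cp.length - 1 - k : ℕ) : ℤ) + 1))).2 _ hmm
        rw [hje] at hle
        have h2 := le_max_right
          (((List.range (k + 1)).map (fun j : ℕ => cp.getD j 0 - ((k : ℤ) - (j : ℤ)))).foldl max
            (0 - ((k : ℤ) + 1)))
          (((List.range (cp.length - 1 - k + 1)).map
            (fun j : ℕ => cp.reverse.getD j 0 - (((cp.length - 1 - k : ℕ) : ℤ) - (j : ℤ)))).foldl max
          (0 - (((cp.length - 1 - k : ℕ) : ℤ) + 1)))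
        have h3 := le_max_left
          (max (((List.range (k + 1)).map (fun j : ℕ => cp.getD j 0 - ((k : ℤ) - (j : ℤ)))).foldl max
            (0 - ((k : ℤ) + 1)))
            (((List.range (cp.length - 1 - k + 1)).map
              (fun j : ℕ => cp.reverse.getD j 0 - (((cp.length - 1 - k : ℕ) : ℤ) - (j : ℤ)))).foldl max
            (0 - (((cp.length - 1 - k : ℕ) : ℤ) + 1)))) (0 : ℤ)
        omega

-- ===== VERDICT (by name: the statement is the Claim_ definition above) =====
theorem maximum_points_row_spec : Claim_equal_maximum_points_row := by
  intro cp _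
  show maximum_points_row cp = maximum_points_row_alt cp
  rcases maximum_points_row_char cp with ⟨la, ha⟩
  rcases maximum_points_row_alt_char cp with ⟨lb, hb⟩
  apply List.ext_getElem?
  intro k
  by_cases hk : k < cp.length
  · rw [ha k hk, hb k hk]
  · rw [List.getElem?_eq_none (by omega), List.getElem?_eq_none (by omega)]
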